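-- pv_equiv track=rewrite | github.com/toshima/codejam | 2017-1c/c2.py | calc
-- ===== SOURCE A (Python) =====
-- def calc(probs, K):
--     N = len(probs)
--     dp = [[0 for _ in range(N+1)] for _ in range(N)]
--     dp[0][0] = 10000-probs[0]
--     dp[0][1] = probs[0]
--     for i in range(1, N):
--         for j in range(N+1):
--             dp[i][j] = (10000-probs[i]) * dp[i-1][j]
--             if j:
--                 dp[i][j] += probs[i] * dp[i-1][j-1]
--     return sum(dp[N-1][k] for k in range(K, N+1))
-- ===== SOURCE B (Python) =====
-- def calc(probs, K):
--     def poly(lo, hi):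
--         if hi <= lo:
--             return [1]
--         if hi == lo + 1:
--             p = probs[lo]
--             return [10000 - p, p]
--         mid = (lo + hi) // 2
--         left = poly(lo, mid)
--         right = poly(mid, hi)
--         out = [0] * (len(left) + len(right) - 1)
--         for i, x in enumerate(left):
--             for j, y in enumerate(right):
--                 out[i + j] += x * y
--         return out
--     coeffs = poly(0, len(probs))
--     return sum(coeffs[max(K, 0):])
-- ===== Notes on version B (the rewrite author's own statement) =====
-- stated objective: alternative
-- what changed: Replaced the row-by-row N x (N+1) DP table with a divide-and-conquer that builds the success-count polynomial by recursively convolving the coefficient lists of the two halves, then sums the tail coefficients.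
-- intended difference: For -(len(probs)+1) <= K < 0 A's generator reads dp[N-1][k] at negative indices, Python wraparound making it double-count the top |K| coefficients on top of the full sum; B returns the plain sum of all coefficients (probability of >= 0 successes), which is the intended tail value. — e.g. on calc([5000], -1): A returns 15000, B returns 10000
import Mathlib
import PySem

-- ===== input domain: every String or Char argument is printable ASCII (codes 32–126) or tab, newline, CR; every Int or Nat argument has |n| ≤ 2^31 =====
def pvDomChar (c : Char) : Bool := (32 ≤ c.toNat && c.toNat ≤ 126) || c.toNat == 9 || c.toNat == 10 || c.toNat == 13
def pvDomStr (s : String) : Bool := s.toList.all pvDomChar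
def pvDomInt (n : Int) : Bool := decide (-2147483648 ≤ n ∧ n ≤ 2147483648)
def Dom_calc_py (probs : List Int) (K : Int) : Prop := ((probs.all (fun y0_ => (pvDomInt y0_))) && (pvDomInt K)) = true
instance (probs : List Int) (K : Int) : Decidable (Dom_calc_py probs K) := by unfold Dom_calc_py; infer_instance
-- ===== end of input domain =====

-- B replaces the row-by-row DP table with a divide-and-conquer polynomial build (recursive halves
-- convolved); for negative K, A's Python wraparound double-counts top coefficients (see D_ below),
-- B returns the intended full tail sum; objective: alternative decomposition, no speed claim.


-- ===== PORT A =====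
-- dp[i][j] read/write (total forms; in-range on every admitted input)
def dpGet (dp : List (List Int)) (i j : Int) : Int :=
  PySem.List.pyGetD (PySem.List.pyGetD dp i []) j 0

def dpSet (dp : List (List Int)) (i j : Int) (v : Int) : List (List Int) :=
  PySem.List.pySetD dp i (PySem.List.pySetD (PySem.List.pyGetD dp i []) j v)

def calc_py (probs : List Int) (K : Int) : Int :=
  let N : Int := probs.length
  let dp : List (List Int) :=
    (PySem.List.pyRange 0 N 1).map (fun _ => (PySem.List.pyRange 0 (N+1) 1).map (fun _ => (0:Int)))
  let dp := dpSet dp 0 0 (10000 - PySem.List.pyGetD probs 0 0)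
  let dp := dpSet dp 0 1 (PySem.List.pyGetD probs 0 0)
  let dp := (PySem.List.pyRange 1 N 1).foldl (fun dp i =>
    (PySem.List.pyRange 0 (N+1) 1).foldl (fun dp j =>
      let dp := dpSet dp i j ((10000 - PySem.List.pyGetD probs i 0) * dpGet dp (i-1) j)
      if j ≠ 0 then
        dpSet dp i j (dpGet dp i j + PySem.List.pyGetD probs i 0 * dpGet dp (i-1) (j-1))
      else dp) dp) dp
  ((PySem.List.pyRange K (N+1) 1).map (fun k => dpGet dp (N-1) k)).sum

-- ===== PORT B =====
-- out[i+j] += x*y over enumerate(left), enumerate(right)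
def convB (left right : List Int) : List Int :=
  let out : List Int := List.replicate (left.length + right.length - 1) 0
  (PySem.List.enumerate left).foldl (fun out ix =>
    (PySem.List.enumerate right).foldl (fun out jy =>
      PySem.List.pySetD out (ix.1 + jy.1)
        (PySem.List.pyGetD out (ix.1 + jy.1) 0 + ix.2 * jy.2)) out) out

-- fuel = hi - lo bounds the recursion depth; it only makes the recursion structural
def polyB (probs : List Int) (fuel lo hi : Nat) : List Int :=
  match fuel with
  | 0 => [1]
  | fuel + 1 =>
    if hi ≤ lo then [1]
    else if hi = lo + 1 then
      let p := PySem.List.pyGetD probs (lo : Int) 0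
      [10000 - p, p]
    else
      let mid := (lo + hi) / 2
      convB (polyB probs fuel lo mid) (polyB probs fuel mid hi)

def calc_py_alt (probs : List Int) (K : Int) : Int :=
  let coeffs := polyB probs probs.length 0 probs.length
  (PySem.List.slice coeffs (some (max K 0)) none).sum

-- ===== PRECONDITION & SPEC =====
-- Pre_ excludes exactly the inputs where A raises IndexError: empty probs (dp[0][0] read of an
-- empty table) and K < -(len(probs)+1) (dp[N-1][k] index below the wraparound range).
def Pre_calc_py (probs : List Int) (K : Int) : Prop :=
  probs ≠ [] ∧ -((probs.length : Int) + 1) ≤ K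
instance (probs : List Int) (K : Int) : Decidable (Pre_calc_py probs K) := by
  unfold Pre_calc_py; infer_instance

def pvWitness_calc_py : List Int × Int := ([5000], 0)

-- For -(len(probs)+1) <= K < 0 A's generator reads dp[N-1][k] at negative indices, Python
-- wraparound making it double-count the top |K| coefficients on top of the full sum; B returns the
-- plain sum of all coefficients (the probability of >= 0 successes), the intended tail value.
def D_calc_py (probs : List Int) (K : Int) : Prop := K < 0
instance (probs : List Int) (K : Int) : Decidable (D_calc_py probs K) := by
  unfold D_calc_py; infer_instance

def Spec_calc_py (probs : List Int) (K : Int) (out : Int) : Prop :=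
  ¬ D_calc_py probs K → out = calc_py_alt probs K
instance (probs : List Int) (K : Int) (out : Int) : Decidable (Spec_calc_py probs K out) := by
  unfold Spec_calc_py; infer_instance

def pvDiffWitness_calc_py : List Int × Int := ([5000], -1)
def pvDiffWitnessOut_calc_py : Int × Int := (15000, 10000)

-- ===== CLAIM (what is proved, stated in full; the proofs are below) =====
def Claim_unchanged_calc_py : Prop := ∀ (probs : List Int) (K : Int), Dom_calc_py probs K → Pre_calc_py probs K → Spec_calc_py probs K (calc_py probs K)
def Claim_changed_calc_py : Prop := Dom_calc_py (pvDiffWitness_calc_py.1) (pvDiffWitness_calc_py.2) ∧ Pre_calc_py (pvDiffWitness_calc_py.1) (pvDiffWitness_calc_py.2) ∧ D_calc_py (pvDiffWitness_calc_py.1) (pvDiffWitness_calc_py.2) ∧ calc_py (pvDiffWitness_calc_py.1) (pvDiffWitness_calc_py.2) = pvDiffWitnessOut_calc_py.1 ∧ calc_py_alt (pvDiffWitness_calc_py.1) (pvDiffWitness_calc_py.2) = pvDiffWitnessOut_calc_py.2 ∧ pvDiffWitnessOut_calc_py.1 ≠ pvDiffWitnessOut_calc_py.2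
-- ===== LEMMAS AND PROOFS =====

def stepP (p : Int) (c : List Int) : List Int :=
  (List.range (c.length + 1)).map
    (fun n => (10000 - p) * c.getD n 0 + (if n = 0 then 0 else p * c.getD (n-1) 0))

def specPoly (xs : List Int) : List Int := xs.foldl (fun c p => stepP p c) [1]

theorem stepP_length (p : Int) (c : List Int) : (stepP p c).length = c.length + 1 := by simp [stepP]

theorem stepP_getD (p : Int) (c : List Int) (n : Nat) :
    (stepP p c).getD n 0 =
      (10000 - p) * c.getD n 0 + (if n = 0 then 0 else p * c.getD (n-1) 0) := by
  by_cases h : n < c.length + 1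
  · simp [stepP, List.getD, h]
  · have h1 : c.getD n 0 = 0 := List.getD_eq_default _ _ (by omega)
    have h2 : c.getD (n-1) 0 = 0 := List.getD_eq_default _ _ (by omega)
    have h3 : (stepP p c).getD n 0 = 0 := List.getD_eq_default _ _ (by simp [stepP]; omega)
    rw [h1, h2, h3]
    have : n ≠ 0 := by omega
    simp [this]

theorem foldl_stepP_length (xs : List Int) : ∀ (c : List Int),
    (xs.foldl (fun c p => stepP p c) c).length = c.length + xs.length := by
  induction xs with
  | nil => simp
  | cons x xs ih => intro c; rw [List.foldl_cons, ih, stepP_length, List.length_cons]; omega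

theorem specPoly_length (xs : List Int) : (specPoly xs).length = xs.length + 1 := by
  rw [specPoly, foldl_stepP_length]; simp; omega

-- conv length

theorem foldl_pySetD_length {β : Type} (l : List β) (g : List Int → β → Int) (h : List Int → β → Int) :
    ∀ (out : List Int), (l.foldl (fun o y => PySem.List.pySetD o (g o y) (h o y)) out).length = out.length := by
  induction l with
  | nil => intro out; simp
  | cons x xs ih => intro out; rw [List.foldl_cons, ih, PySem.List.length_pySetD]

theorem convB_length (a b : List Int) :
    (convB a b).length = a.length + b.length - 1 := by
  rw [convB]
  have inner : ∀ (ix : Int × Int) (out : List Int),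
      ((PySem.List.enumerate b).foldl (fun out jy =>
        PySem.List.pySetD out (ix.1 + jy.1)
          (PySem.List.pyGetD out (ix.1 + jy.1) 0 + ix.2 * jy.2)) out).length = out.length := by
    intro ix out
    exact foldl_pySetD_length (PySem.List.enumerate b) (fun (o : List Int) (jy : Int × Int) => ix.1 + jy.1) (fun (o : List Int) (jy : Int × Int) => PySem.List.pyGetD o (ix.1 + jy.1) 0 + ix.2 * jy.2) out
  have outer : ∀ (l : List (Int × Int)) (out : List Int),
      (l.foldl (fun out ix =>
        (PySem.List.enumerate b).foldl (fun out jy =>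
          PySem.List.pySetD out (ix.1 + jy.1)
            (PySem.List.pyGetD out (ix.1 + jy.1) 0 + ix.2 * jy.2)) out) out).length = out.length := by
    intro l
    induction l with
    | nil => intro out; simp
    | cons x xs ih => intro out; rw [List.foldl_cons, ih, inner]
  rw [outer]; simp

theorem pySetD_natCast' (xs : List Int) (n : Nat) (v : Int) (h : n < xs.length) :
    PySem.List.pySetD xs (n : Int) v = xs.set n v := by
  unfold PySem.List.pySetD; rw [PySem.List.pySet?_natCast xs n v h]; rfl

theorem getD_set' (xs : List Int) (m n : Nat) (v : Int) (hm : m < xs.length) :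
    (xs.set m v).getD n 0 = if n = m then v else xs.getD n 0 := by
  simp only [List.getD, List.getElem?_set]
  by_cases h : n = m
  · subst h; simp [hm]
  · have h2 : ¬ m = n := fun hh => h hh.symm
    simp [h, h2]

theorem inner_getD (x : Int) (i : Nat) : ∀ (b : List Int) (s : Nat) (out : List Int),
    i + s + b.length ≤ out.length → ∀ n : Nat,
    ((PySem.List.enumerate b (s:Int)).foldl (fun o jy =>
        PySem.List.pySetD o ((i:Int) + jy.1) (PySem.List.pyGetD o ((i:Int) + jy.1) 0 + x * jy.2)) out).getD n 0
      = out.getD n 0 + x * (if i + s ≤ n then b.getD (n - (i+s)) 0 else 0) := by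
  intro b
  induction b with
  | nil =>
    intro s out _ n
    simp [PySem.List.enumerate_nil]
  | cons y b' ih =>
    intro s out hlen n
    rw [PySem.List.enumerate_cons, List.foldl_cons]
    have hcast : (i:Int) + (s:Int) = ((i+s : Nat) : Int) := by push_cast; ring
    have hin : i + s < out.length := by simp at hlen ⊢; omega
    have hget : PySem.List.pyGetD out ((i:Int) + (s:Int)) 0 = out.getD (i+s) 0 := by
      rw [hcast, PySem.List.pyGetD_natCast]
    have hset : PySem.List.pySetD out ((i:Int) + (s:Int)) (PySem.List.pyGetD out ((i:Int) + (s:Int)) 0 + x * y)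
        = out.set (i+s) (out.getD (i+s) 0 + x * y) := by
      rw [hget, hcast, pySetD_natCast' _ _ _ hin]
    have hs1 : ((s:Int) + 1) = (((s+1 : Nat)) : Int) := by push_cast; ring
    rw [hset, hs1, ih (s+1) _ (by simp [List.length_set]; simp at hlen; omega) n]
    rw [getD_set' _ _ _ _ hin]
    by_cases h1 : n = i + s
    · subst h1
      simp [show ¬ (i + (s+1) ≤ i + s) by omega, show i + s - (i+s) = 0 by omega]
    · simp only [if_neg h1]
      by_cases h2 : i + s ≤ n
      · have h3 : i + (s+1) ≤ n := by omega
        have h4 : n - (i + s) = (n - (i + (s+1))) + 1 := by omega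
        simp [h3, h2, h4]
      · simp [show ¬ (i + (s+1) ≤ n) by omega, h2]

theorem outer_getD (b : List Int) : ∀ (a : List Int) (s : Nat) (out : List Int),
    s + a.length + b.length ≤ out.length + 1 → ∀ n : Nat,
    ((PySem.List.enumerate a (s:Int)).foldl (fun o ix =>
       (PySem.List.enumerate b).foldl (fun o jy =>
         PySem.List.pySetD o (ix.1 + jy.1)
           (PySem.List.pyGetD o (ix.1 + jy.1) 0 + ix.2 * jy.2)) o) out).getD n 0
    = out.getD n 0 + ∑ k ∈ Finset.range a.length,
        a.getD k 0 * (if s + k ≤ n then b.getD (n - (s+k)) 0 else 0) := by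
  intro a
  induction a with
  | nil => intro s out _ n; simp [PySem.List.enumerate_nil]
  | cons x a' ih =>
    intro s out hlen n
    rw [PySem.List.enumerate_cons, List.foldl_cons]
    have h0 : (PySem.List.enumerate b) = (PySem.List.enumerate b ((0:Nat):Int)) := by norm_num
    set out' := (PySem.List.enumerate b).foldl (fun o jy =>
         PySem.List.pySetD o ((s:Int) + jy.1)
           (PySem.List.pyGetD o ((s:Int) + jy.1) 0 + x * jy.2)) out with hout'
    have hlen' : out'.length = out.length := by
      rw [hout']
      exact foldl_pySetD_length (PySem.List.enumerate b)
        (fun (o : List Int) (jy : Int × Int) => (s:Int) + jy.1)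
        (fun (o : List Int) (jy : Int × Int) => PySem.List.pyGetD o ((s:Int) + jy.1) 0 + x * jy.2) out
    have hs1 : ((s:Int) + 1) = (((s+1 : Nat)) : Int) := by push_cast; ring
    rw [hs1, ih (s+1) out' (by simp [hlen']; simp [List.length_cons] at hlen; omega) n]
    have houtg : ∀ m : Nat, out'.getD m 0 = out.getD m 0 + x * (if s ≤ m then b.getD (m - s) 0 else 0) := by
      intro m
      rw [hout', h0]
      have := inner_getD x s b 0 out (by simp [List.length_cons] at hlen; omega) m
      simpa using this
    rw [houtg n]
    rw [List.length_cons, Finset.sum_range_succ']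
    simp only [List.getD_cons_succ, List.getD_cons_zero]
    have hshift : ∀ k : Nat, (if s + 1 + k ≤ n then b.getD (n - (s+1+k)) 0 else 0)
        = (if s + (k+1) ≤ n then b.getD (n - (s+(k+1))) 0 else 0) := by
      intro k
      have : s + 1 + k = s + (k + 1) := by omega
      rw [this]
    simp only [hshift]
    ring_nf

theorem convB_getD (a b : List Int) (ha : a ≠ []) (hb : b ≠ []) (n : Nat) :
    (convB a b).getD n 0 =
      ∑ k ∈ Finset.range a.length, a.getD k 0 * (if k ≤ n then b.getD (n-k) 0 else 0) := by
  have hla : 1 ≤ a.length := List.length_pos_of_ne_nil ha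
  have hlb : 1 ≤ b.length := List.length_pos_of_ne_nil hb
  rw [convB]
  have h0 : (PySem.List.enumerate a) = (PySem.List.enumerate a ((0:Nat):Int)) := by norm_num
  rw [h0, outer_getD b a 0 _ (by simp [List.length_replicate]; omega) n]
  simp

theorem convB_one (a : List Int) (ha : a ≠ []) : convB a [1] = a := by
  apply List.ext_getElem
  · rw [convB_length]; simp
  · intro n h1 h2
    have hg : (convB a [1]).getD n 0 = a.getD n 0 := by
      rw [convB_getD a [1] ha (by simp)]
      rw [Finset.sum_eq_single n]
      · simp [show n - n = 0 from by omega]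
      · intro k hk hkn
        by_cases hkle : k ≤ n
        · have : n - k ≠ 0 := by omega
          simp [hkle, List.getD, this]
        · simp [hkle]
      · intro hn
        simp at hn
        omega
    rw [List.getD_eq_getElem _ _ h1] at hg
    rw [List.getD_eq_getElem _ _ h2] at hg
    exact hg

theorem convB_stepP (p : Int) (a b : List Int) (ha : a ≠ []) (hb : b ≠ []) :
    convB a (stepP p b) = stepP p (convB a b) := by
  have hla : 1 ≤ a.length := List.length_pos_of_ne_nil ha
  have hlb : 1 ≤ b.length := List.length_pos_of_ne_nil hb
  have hsne : stepP p b ≠ [] := by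
    intro h; have := stepP_length p b; rw [h] at this; simp at this
  have hcne : convB a b ≠ [] := by
    intro h; have := convB_length a b; rw [h] at this; simp at this; omega
  have key : ∀ n : Nat, (convB a (stepP p b)).getD n 0 = (stepP p (convB a b)).getD n 0 := by
    intro n
    rw [convB_getD a (stepP p b) ha hsne, stepP_getD, convB_getD a b ha hb, convB_getD a b ha hb]
    simp only [stepP_getD p b]
    by_cases hn : n = 0
    · subst hn
      norm_num
      split_ifs
      · ring
      · rfl
    · simp only [if_neg hn]
      rw [Finset.mul_sum, Finset.mul_sum, ← Finset.sum_add_distrib]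
      refine Finset.sum_congr rfl (fun k _ => ?_)
      by_cases hk : k ≤ n
      · by_cases hk2 : k ≤ n - 1
        · have h1 : ¬ (n - k = 0) := by omega
          have h2 : n - k - 1 = n - 1 - k := by omega
          simp only [if_pos hk, if_pos hk2, if_neg h1, h2]
          ring
        · have h1 : n - k = 0 := by omega
          simp only [if_pos hk, if_neg hk2, h1]
          norm_num
          ring
      · have hk2 : ¬ k ≤ n - 1 := by omega
        simp only [if_neg hk, if_neg hk2]
        ring
  apply List.ext_getElem
  · rw [convB_length, stepP_length, stepP_length, convB_length]; omega
  · intro n h1 h2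
    have := key n
    rw [List.getD_eq_getElem _ _ h1, List.getD_eq_getElem _ _ h2] at this
    exact this

theorem specPoly_append_singleton (xs : List Int) (p : Int) :
    specPoly (xs ++ [p]) = stepP p (specPoly xs) := by
  simp [specPoly]

theorem specPoly_ne_nil (xs : List Int) : specPoly xs ≠ [] := by
  intro h; have := specPoly_length xs; rw [h] at this; simp at this

theorem specPoly_singleton (x : Int) : specPoly [x] = [10000 - x, x] := by
  simp [specPoly, stepP, List.range_succ]

theorem convB_specPoly (xs : List Int) (hx : xs ≠ []) : ∀ (ys : List Int), ys ≠ [] →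
    convB (specPoly xs) (specPoly ys) = specPoly (xs ++ ys) := by
  intro ys
  induction ys using List.reverseRecOn with
  | nil => intro h; exact absurd rfl h
  | append_singleton ys' p ih =>
    intro _
    by_cases hys' : ys' = []
    · subst hys'
      simp only [List.nil_append]
      have h1 : specPoly [p] = stepP p [1] := rfl
      rw [h1, convB_stepP p _ [1] (specPoly_ne_nil xs) (by simp),
        convB_one _ (specPoly_ne_nil xs), specPoly_append_singleton]
    · rw [specPoly_append_singleton ys' p,
        convB_stepP p _ _ (specPoly_ne_nil xs) (specPoly_ne_nil ys'), ih hys',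
        ← List.append_assoc, specPoly_append_singleton]

theorem take_seg_ne_nil (probs : List Int) (lo hi : Nat) (h1 : lo < hi) (h2 : hi ≤ probs.length) :
    (probs.drop lo).take (hi - lo) ≠ [] := by
  intro h
  have := congrArg List.length h
  simp [List.length_take, List.length_drop] at this
  omega

theorem polyB_eq (probs : List Int) : ∀ (fuel lo hi : Nat), hi - lo ≤ fuel → hi ≤ probs.length →
    polyB probs fuel lo hi = specPoly ((probs.drop lo).take (hi - lo)) := by
  intro fuel
  induction fuel with
  | zero =>
    intro lo hi hf _
    have h0 : hi - lo = 0 := by omega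
    rw [polyB, h0]
    simp [specPoly]
  | succ fuel ih =>
    intro lo hi hf hh
    rw [polyB]
    by_cases hle : hi ≤ lo
    · have h0 : hi - lo = 0 := by omega
      rw [if_pos hle, h0]
      simp [specPoly]
    · rw [if_neg hle]
      by_cases hone : hi = lo + 1
      · rw [if_pos hone]
        have hlo : lo < probs.length := by omega
        have hdrop : probs.drop lo = probs[lo] :: probs.drop (lo+1) := List.drop_eq_getElem_cons hlo
        have htake : (probs.drop lo).take (hi - lo) = [probs[lo]] := by
          rw [hdrop, show hi - lo = 1 by omega]
          rfl
        rw [htake, specPoly_singleton]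
        have hpg : PySem.List.pyGetD probs (lo : Int) 0 = probs[lo] := by
          rw [PySem.List.pyGetD_natCast]
          exact List.getD_eq_getElem _ _ hlo
        rw [hpg]
      · rw [if_neg hone]
        show convB (polyB probs fuel lo ((lo+hi)/2)) (polyB probs fuel ((lo+hi)/2) hi)
          = specPoly (List.take (hi - lo) (List.drop lo probs))
        have hmid1 : lo < (lo + hi) / 2 := by omega
        have hmid2 : (lo + hi) / 2 < hi := by omega
        rw [ih lo ((lo+hi)/2) (by omega) (by omega),
            ih ((lo+hi)/2) hi (by omega) hh,
            convB_specPoly _ (take_seg_ne_nil probs lo _ hmid1 (by omega)) _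
              (take_seg_ne_nil probs _ hi hmid2 hh)]
        congr 1
        have hsplit : hi - lo = ((lo+hi)/2 - lo) + (hi - (lo+hi)/2) := by omega
        have hdd : (List.drop lo probs).drop ((lo+hi)/2 - lo) = List.drop ((lo+hi)/2) probs := by
          rw [List.drop_drop]; congr 1; omega
        rw [hsplit, List.take_add, hdd]

theorem pyGetD_natCast'' (xs : List (List Int)) (n : Nat) :
    PySem.List.pyGetD xs (n : Int) [] = xs.getD n [] := PySem.List.pyGetD_natCast xs n []

theorem pySetD_natCastL (xs : List (List Int)) (n : Nat) (v : List Int) (h : n < xs.length) :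
    PySem.List.pySetD xs (n : Int) v = xs.set n v := by
  unfold PySem.List.pySetD; rw [PySem.List.pySet?_natCast xs n v h]; rfl

theorem getD_setL (xs : List (List Int)) (m n : Nat) (v : List Int) (hm : m < xs.length) :
    (xs.set m v).getD n [] = if n = m then v else xs.getD n [] := by
  simp only [List.getD, List.getElem?_set]
  by_cases h : n = m
  · subst h; simp [hm]
  · have h2 : ¬ m = n := fun hh => h hh.symm
    simp [h, h2]

theorem dpGet_natCast (dp : List (List Int)) (r j : Nat) :
    dpGet dp (r : Int) (j : Int) = (dp.getD r []).getD j 0 := by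
  rw [dpGet, pyGetD_natCast'', PySem.List.pyGetD_natCast]

theorem dpSet_natCast (dp : List (List Int)) (r j : Nat) (v : Int)
    (hr : r < dp.length) (hj : j < (dp.getD r []).length) :
    dpSet dp (r : Int) (j : Int) v = dp.set r ((dp.getD r []).set j v) := by
  rw [dpSet, pyGetD_natCast'']
  rw [show PySem.List.pySetD (dp.getD r []) (j:Int) v = (dp.getD r []).set j v from by
    unfold PySem.List.pySetD; rw [PySem.List.pySet?_natCast _ j v hj]; rfl]
  exact pySetD_natCastL dp r _ hr

def fA (probs : List Int) (i : Nat) (prev : List Int) (j : Nat) : Int :=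
  (10000 - probs.getD i 0) * prev.getD j 0 +
    (if j = 0 then 0 else probs.getD i 0 * prev.getD (j-1) 0)

theorem inner_A (probs : List Int) (i : Nat) (h1 : 1 ≤ i) (hiN : i < probs.length)
    (prev : List Int) :
    ∀ (cnt jl : Nat) (dp : List (List Int)), jl + cnt = probs.length + 1 →
    dp.length = probs.length →
    (∀ r : Nat, r < probs.length → (dp.getD r []).length = probs.length + 1) →
    dp.getD (i-1) [] = prev →
    (let res := (PySem.List.pyRange (jl:Int) ((probs.length:Int)+1) 1).foldl (fun dp j =>
      let dp1 := dpSet dp (i:Int) j ((10000 - PySem.List.pyGetD probs (i:Int) 0) * dpGet dp ((i:Int)-1) j)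
      if j ≠ 0 then
        dpSet dp1 (i:Int) j (dpGet dp1 (i:Int) j + PySem.List.pyGetD probs (i:Int) 0 * dpGet dp1 ((i:Int)-1) (j-1))
      else dp1) dp
     res.length = dp.length ∧
     (∀ r : Nat, r ≠ i → res.getD r [] = dp.getD r []) ∧
     (∀ r : Nat, r < probs.length → (res.getD r []).length = probs.length + 1) ∧
     (∀ j : Nat, (res.getD i []).getD j 0 =
        if jl ≤ j ∧ j < probs.length + 1 then fA probs i prev j
        else (dp.getD i []).getD j 0)) := by
  intro cnt
  induction cnt with
  | zero =>
    intro jl dp hcnt hlen hrow hprev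
    have hnil : PySem.List.pyRange (jl:Int) ((probs.length:Int)+1) 1 = [] := by
      apply PySem.List.pyRange_one_eq_nil
      omega
    rw [hnil]
    exact ⟨rfl, fun r _ => rfl, hrow, fun j => by rw [if_neg (by omega)]; rfl⟩
    
  | succ cnt ih =>
    intro jl dp hcnt hlen hrow hprev
    have hlt : (jl:Int) < (probs.length:Int)+1 := by
      have : jl < probs.length + 1 := by omega
      exact_mod_cast this
    rw [PySem.List.pyRange_one_cons hlt, List.foldl_cons]
    have hp : PySem.List.pyGetD probs (i:Int) 0 = probs.getD i 0 := PySem.List.pyGetD_natCast probs i 0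
    have him1 : (i:Int) - 1 = ((i-1 : Nat) : Int) := by push_cast; omega
    have hgprev : dpGet dp ((i:Int)-1) (jl:Int) = prev.getD jl 0 := by
      rw [him1, dpGet_natCast, hprev]
    have hrowi : (dp.getD i []).length = probs.length + 1 := hrow i hiN
    have hjl : jl < (dp.getD i []).length := by omega
    have hidp : i < dp.length := by omega
    -- the written value
    set v1 := (10000 - PySem.List.pyGetD probs (i:Int) 0) * dpGet dp ((i:Int)-1) (jl:Int) with hv1
    have hset1 : dpSet dp (i:Int) (jl:Int) v1 = dp.set i ((dp.getD i []).set jl v1) :=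
      dpSet_natCast dp i jl v1 hidp hjl
    have hstep : (let dp1 := dpSet dp (i:Int) (jl:Int) v1
        if (jl:Int) ≠ 0 then
          dpSet dp1 (i:Int) (jl:Int) (dpGet dp1 (i:Int) (jl:Int) + PySem.List.pyGetD probs (i:Int) 0 * dpGet dp1 ((i:Int)-1) ((jl:Int)-1))
        else dp1) = dp.set i ((dp.getD i []).set jl (fA probs i prev jl)) := by
      by_cases hj0 : jl = 0
      · subst hj0
        norm_num at hgprev
        simp only [hset1]
        norm_num [fA, hgprev, hp, hv1]
      · have hj0' : ((jl:Int) ≠ 0) := by exact_mod_cast hj0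
        simp only [hset1, if_pos hj0']
        have hlen1 : (dp.set i ((dp.getD i []).set jl v1)).length = dp.length := by simp
        have hrow1 : (dp.set i ((dp.getD i []).set jl v1)).getD i [] = (dp.getD i []).set jl v1 := by
          rw [getD_setL _ _ _ _ hidp, if_pos rfl]
        have hg1 : dpGet (dp.set i ((dp.getD i []).set jl v1)) (i:Int) (jl:Int) = v1 := by
          rw [dpGet_natCast, hrow1, getD_set' _ _ _ _ hjl, if_pos rfl]
        have hjm1 : (jl:Int) - 1 = ((jl-1 : Nat) : Int) := by push_cast; omega
        have hg2 : dpGet (dp.set i ((dp.getD i []).set jl v1)) ((i:Int)-1) ((jl:Int)-1) = prev.getD (jl-1) 0 := by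
          rw [him1, hjm1, dpGet_natCast, getD_setL _ _ _ _ hidp, if_neg (by omega), hprev]
        rw [hg1, hg2]
        have hset2 := dpSet_natCast (dp.set i ((dp.getD i []).set jl v1)) i jl
            (v1 + PySem.List.pyGetD probs (i:Int) 0 * prev.getD (jl-1) 0)
            (by rw [hlen1]; exact hidp) (by rw [hrow1, List.length_set]; exact hjl)
        rw [hrow1] at hset2
        rw [hset2, List.set_set, List.set_set]
        congr 1
        rw [fA, hv1, hgprev, hp, if_neg hj0]
    rw [hstep]
    have hres := ih (jl+1) (dp.set i ((dp.getD i []).set jl (fA probs i prev jl)))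
      (by omega) (by simpa using hlen)
      (by
        intro r hr
        rw [getD_setL _ _ _ _ hidp]
        by_cases hri : r = i
        · subst hri; rw [if_pos rfl]; simpa using hrowi
        · rw [if_neg hri]; exact hrow r hr)
      (by
        rw [getD_setL _ _ _ _ hidp, if_neg (by omega)]
        exact hprev)
    have hcast1 : ((jl:Int) + 1) = (((jl+1 : Nat)) : Int) := by push_cast; ring
    rw [hcast1]
    refine ⟨?_, ?_, ?_, ?_⟩
    · rw [hres.1]; simp
    · intro r hri
      rw [hres.2.1 r hri, getD_setL _ _ _ _ hidp, if_neg hri]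
    · exact hres.2.2.1
    · intro j
      rw [hres.2.2.2 j]
      by_cases hcond : jl + 1 ≤ j ∧ j < probs.length + 1
      · rw [if_pos hcond, if_pos (by omega)]
      · rw [if_neg hcond]
        rw [getD_setL _ _ _ _ hidp, if_pos rfl, getD_set' _ _ _ _ hjl]
        by_cases hjj : j = jl
        · subst hjj
          rw [if_pos rfl, if_pos (by omega)]
        · rw [if_neg hjj, if_neg (by omega)]

def zRow (probs : List Int) : List Int :=
  (PySem.List.pyRange 0 ((probs.length:Int)+1) 1).map (fun _ => (0:Int))

def dp0A (probs : List Int) : List (List Int) :=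
  (PySem.List.pyRange 0 (probs.length:Int) 1).map (fun _ => zRow probs)

def dp2A (probs : List Int) : List (List Int) :=
  dpSet (dpSet (dp0A probs) 0 0 (10000 - PySem.List.pyGetD probs 0 0)) 0 1 (PySem.List.pyGetD probs 0 0)

theorem zRow_length (probs : List Int) : (zRow probs).length = probs.length + 1 := by
  rw [zRow, List.length_map, PySem.List.length_pyRange_one]; omega

theorem zRow_getD (probs : List Int) (j : Nat) : (zRow probs).getD j 0 = 0 := by
  cases hj : (zRow probs)[j]? with
  | none => simp [List.getD, hj]
  | some x =>
    have hx : x ∈ zRow probs := List.mem_of_getElem? hj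
    simp only [zRow, List.mem_map] at hx
    obtain ⟨_, _, hx⟩ := hx
    simp [List.getD, hj, ← hx]

theorem dp0A_length (probs : List Int) : (dp0A probs).length = probs.length := by
  rw [dp0A, List.length_map, PySem.List.length_pyRange_one]; omega

theorem dp0A_getD (probs : List Int) (r : Nat) (hr : r < probs.length) :
    (dp0A probs).getD r [] = zRow probs := by
  have hr' : r < (dp0A probs).length := by rw [dp0A_length]; exact hr
  rw [List.getD_eq_getElem _ _ hr']
  have : (dp0A probs)[r] ∈ dp0A probs := List.getElem_mem hr'
  simp only [dp0A, List.mem_map] at this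
  obtain ⟨_, _, h⟩ := this
  exact h.symm

theorem dp2A_eq (probs : List Int) (hlenpos : 1 ≤ probs.length) :
    dp2A probs = (dp0A probs).set 0
      ((zRow probs).set 0 (10000 - PySem.List.pyGetD probs 0 0) |>.set 1 (PySem.List.pyGetD probs 0 0)) := by
  have h0 : ((0:Nat):Int) = (0:Int) := by norm_num
  have h1 : ((1:Nat):Int) = (1:Int) := by norm_num
  have hl : 0 < (dp0A probs).length := by rw [dp0A_length]; omega
  have hrow : (dp0A probs).getD 0 [] = zRow probs := dp0A_getD probs 0 hlenpos
  have hs1 := dpSet_natCast (dp0A probs) 0 0 (10000 - PySem.List.pyGetD probs 0 0)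
      hl (by rw [hrow, zRow_length]; omega)
  rw [hrow] at hs1
  push_cast at hs1
  rw [dp2A, hs1]
  have hl2 : 0 < ((dp0A probs).set 0 ((zRow probs).set 0 (10000 - PySem.List.pyGetD probs 0 0))).length := by
    rw [List.length_set]; exact hl
  have hrow2 : ((dp0A probs).set 0 ((zRow probs).set 0 (10000 - PySem.List.pyGetD probs 0 0))).getD 0 []
      = (zRow probs).set 0 (10000 - PySem.List.pyGetD probs 0 0) := by
    rw [getD_setL _ _ _ _ hl, if_pos rfl]
  have hs2 := dpSet_natCast ((dp0A probs).set 0 ((zRow probs).set 0 (10000 - PySem.List.pyGetD probs 0 0))) 0 1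
      (PySem.List.pyGetD probs 0 0) hl2 (by rw [hrow2, List.length_set, zRow_length]; omega)
  rw [hrow2] at hs2
  push_cast at hs2
  rw [hs2, List.set_set]

theorem dp2A_length (probs : List Int) (hlenpos : 1 ≤ probs.length) :
    (dp2A probs).length = probs.length := by
  rw [dp2A_eq probs hlenpos, List.length_set, dp0A_length]

theorem dp2A_rowlen (probs : List Int) (hlenpos : 1 ≤ probs.length) (r : Nat)
    (hr : r < probs.length) : ((dp2A probs).getD r []).length = probs.length + 1 := by
  rw [dp2A_eq probs hlenpos, getD_setL _ _ _ _ (by rw [dp0A_length]; omega)]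
  by_cases h : r = 0
  · rw [if_pos h]; simp [zRow_length]
  · rw [if_neg h, dp0A_getD probs r hr, zRow_length]

theorem dp2A_row0 (probs : List Int) (hlenpos : 1 ≤ probs.length) (j : Nat) :
    ((dp2A probs).getD 0 []).getD j 0 = (specPoly (probs.take 1)).getD j 0 := by
  have h0 : 0 < probs.length := by omega
  have htake : probs.take 1 = [probs[0]] := by
    rw [List.take_succ, List.take_zero, List.getElem?_eq_getElem h0]
    rfl
  have hp0 : PySem.List.pyGetD probs 0 0 = probs[0] := by
    rw [PySem.List.pyGetD_zero]
    exact List.getD_eq_getElem _ _ h0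
  rw [dp2A_eq probs hlenpos, getD_setL _ _ _ _ (by rw [dp0A_length]; omega), if_pos rfl,
    htake, specPoly_singleton]
  have hzl : (zRow probs).length = probs.length + 1 := zRow_length probs
  rw [getD_set' _ _ _ _ (by rw [List.length_set, hzl]; omega)]
  by_cases h1 : j = 1
  · rw [if_pos h1, h1, hp0]
    rfl
  · rw [if_neg h1, getD_set' _ _ _ _ (by rw [hzl]; omega)]
    by_cases h2 : j = 0
    · rw [if_pos h2, h2, hp0]
      rfl
    · rw [if_neg h2, zRow_getD]
      have : ¬ (j < 2) := by omega
      rw [List.getD_eq_default _ _ (by simp; omega)]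

theorem outer_A (probs : List Int) (hne : probs ≠ []) :
    ∀ (b : Nat), 1 ≤ b → b ≤ probs.length →
    (let N : Int := probs.length
     let dp0 : List (List Int) :=
       (PySem.List.pyRange 0 N 1).map (fun _ => (PySem.List.pyRange 0 (N+1) 1).map (fun _ => (0:Int)))
     let dp1 := dpSet dp0 0 0 (10000 - PySem.List.pyGetD probs 0 0)
     let dp2 := dpSet dp1 0 1 (PySem.List.pyGetD probs 0 0)
     let res := (PySem.List.pyRange 1 (b:Int) 1).foldl (fun dp i =>
       (PySem.List.pyRange 0 (N+1) 1).foldl (fun dp j =>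
         let dp1 := dpSet dp i j ((10000 - PySem.List.pyGetD probs i 0) * dpGet dp (i-1) j)
         if j ≠ 0 then
           dpSet dp1 i j (dpGet dp1 i j + PySem.List.pyGetD probs i 0 * dpGet dp1 (i-1) (j-1))
         else dp1) dp) dp2
     res.length = probs.length ∧
     (∀ r : Nat, r < probs.length → (res.getD r []).length = probs.length + 1) ∧
     (∀ j : Nat, (res.getD (b-1) []).getD j 0 = (specPoly (probs.take b)).getD j 0)) := by
  intro b hb1 hbN
  have hlenpos : 1 ≤ probs.length := List.length_pos_of_ne_nil hne
  suffices H : ∀ m : Nat, m + 1 ≤ probs.length →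
      (let res := (PySem.List.pyRange 1 ((m+1 : Nat):Int) 1).foldl (fun dp i =>
         (PySem.List.pyRange 0 (((probs.length:Int))+1) 1).foldl (fun dp j =>
           let dp1 := dpSet dp i j ((10000 - PySem.List.pyGetD probs i 0) * dpGet dp (i-1) j)
           if j ≠ 0 then
             dpSet dp1 i j (dpGet dp1 i j + PySem.List.pyGetD probs i 0 * dpGet dp1 (i-1) (j-1))
           else dp1) dp) (dp2A probs)
       res.length = probs.length ∧
       (∀ r : Nat, r < probs.length → (res.getD r []).length = probs.length + 1) ∧
       (∀ j : Nat, (res.getD (m+1-1) []).getD j 0 = (specPoly (probs.take (m+1))).getD j 0)) by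
    have h := H (b-1) (by omega)
    rw [show b-1+1 = b from by omega] at h
    exact h
  intro m
  induction m with
  | zero =>
    intro _
    have hnil : PySem.List.pyRange 1 ((1:Nat):Int) 1 = [] :=
      PySem.List.pyRange_one_eq_nil (by norm_num)
    rw [hnil]
    exact ⟨dp2A_length probs hlenpos, dp2A_rowlen probs hlenpos,
      fun j => dp2A_row0 probs hlenpos j⟩
  | succ m ih =>
    intro hble
    have ihh := ih (by omega)
    have hm1 : m + 1 < probs.length := by omega
    have hcast : (((m+2 : Nat)):Int) = (((m+1 : Nat)):Int) + 1 := by push_cast; ring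
    rw [show (m+1+1) = m+2 from rfl, hcast,
      PySem.List.pyRange_one_succ_right (show (1:Int) ≤ ((m+1:Nat):Int) by push_cast; omega),
      List.foldl_append]
    simp only [List.foldl_cons, List.foldl_nil]
    set res := (PySem.List.pyRange 1 ((m+1 : Nat):Int) 1).foldl (fun dp i =>
         (PySem.List.pyRange 0 (((probs.length:Int))+1) 1).foldl (fun dp j =>
           let dp1 := dpSet dp i j ((10000 - PySem.List.pyGetD probs i 0) * dpGet dp (i-1) j)
           if j ≠ 0 then
             dpSet dp1 i j (dpGet dp1 i j + PySem.List.pyGetD probs i 0 * dpGet dp1 (i-1) (j-1))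
           else dp1) dp) (dp2A probs) with hres
    have hi := inner_A probs (m+1) (by omega) hm1 (res.getD m []) (probs.length + 1) 0 res
      (by omega) ihh.1 ihh.2.1 (by rw [show m+1-1 = m from rfl])
    simp only [Nat.cast_zero] at hi
    refine ⟨?_, ?_, ?_⟩
    · rw [hi.1, ihh.1]
    · exact hi.2.2.1
    · intro j
      rw [show m+2-1 = m+1 from rfl]
      rw [hi.2.2.2 j]
      by_cases hj : j < probs.length + 1
      · rw [if_pos (⟨Nat.zero_le j, hj⟩ : 0 ≤ j ∧ j < probs.length + 1)]
        have htake : probs.take (m+2) = probs.take (m+1) ++ [probs[m+1]] := by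
          rw [List.take_succ, List.getElem?_eq_getElem hm1]
          rfl
        rw [htake, specPoly_append_singleton, stepP_getD, fA,
          List.getD_eq_getElem probs _ (by omega)]
        have hprevj := ihh.2.2 j
        have hprevj1 := ihh.2.2 (j-1)
        rw [show m+1-1 = m from rfl] at hprevj hprevj1
        rw [hprevj, hprevj1]
      · rw [if_neg (show ¬ (0 ≤ j ∧ j < probs.length + 1) by omega)]
        rw [List.getD_eq_default _ _ (by rw [ihh.2.1 (m+1) hm1]; omega),
          List.getD_eq_default _ _ (by rw [specPoly_length, List.length_take]; omega)]

theorem calc_py_eq (probs : List Int) (K : Int) (hne : probs ≠ []) (hK : 0 ≤ K) :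
    calc_py probs K = ((specPoly probs).drop K.toNat).sum := by
  have hlenpos : 1 ≤ probs.length := List.length_pos_of_ne_nil hne
  have H := outer_A probs hne probs.length hlenpos (le_refl _)
  rw [calc_py]
  set res := (PySem.List.pyRange 1 ((probs.length:Int)) 1).foldl (fun dp i =>
    (PySem.List.pyRange 0 (((probs.length:Int))+1) 1).foldl (fun dp j =>
      let dp1 := dpSet dp i j ((10000 - PySem.List.pyGetD probs i 0) * dpGet dp (i-1) j)
      if j ≠ 0 then
        dpSet dp1 i j (dpGet dp1 i j + PySem.List.pyGetD probs i 0 * dpGet dp1 (i-1) (j-1))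
      else dp1) dp)
    (dpSet (dpSet ((PySem.List.pyRange 0 ((probs.length:Int)) 1).map
        (fun _ => (PySem.List.pyRange 0 (((probs.length:Int))+1) 1).map (fun _ => (0:Int))))
      0 0 (10000 - PySem.List.pyGetD probs 0 0)) 0 1 (PySem.List.pyGetD probs 0 0)) with hresdef
  have hroweq : res.getD (probs.length - 1) [] = specPoly probs := by
    apply List.ext_getElem
    · rw [H.2.1 (probs.length - 1) (by omega), specPoly_length]
    · intro n hn1 hn2
      have := H.2.2 n
      rw [List.take_length] at this
      rw [List.getD_eq_getElem _ _ hn1, List.getD_eq_getElem _ _ hn2] at this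
      exact this
  have him : ((probs.length:Int)) - 1 = ((probs.length - 1 : Nat) : Int) := by push_cast; omega
  have hfun : ∀ k : Int, dpGet res ((probs.length:Int) - 1) k
      = PySem.List.pyGetD (specPoly probs) k 0 := by
    intro k
    rw [dpGet, him, pyGetD_natCast'', hroweq]
  simp only [hfun]
  have hlen' : ((probs.length:Int)) + 1 = PySem.List.len (specPoly probs) := by
    rw [PySem.List.len_eq, specPoly_length]
    push_cast
    ring
  rw [List.sum_eq_foldl, List.foldl_map, hlen',
    PySem.List.foldl_pyRange_pyGetD (specPoly probs) 0 (fun a b => a + b) 0 hK,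
    ← List.sum_eq_foldl]

theorem calc_py_alt_eq (probs : List Int) (K : Int) (hK : 0 ≤ K) :
    calc_py_alt probs K = ((specPoly probs).drop K.toNat).sum := by
  rw [calc_py_alt]
  rw [polyB_eq probs probs.length 0 probs.length (by omega) (le_refl _)]
  rw [List.drop_zero, Nat.sub_zero, List.take_length]
  rw [max_eq_left hK, PySem.List.slice_from _ hK]

-- ===== VERDICT (by name: the statement is the Claim_ definition above) =====
theorem calc_py_spec : Claim_unchanged_calc_py := by
  intro probs K _ hpre hnd
  have hK : 0 ≤ K := by
    unfold D_calc_py at hnd; omega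
  rw [calc_py_eq probs K hpre.1 hK, calc_py_alt_eq probs K hK]

theorem calc_py_changed : Claim_changed_calc_py := by
  unfold Claim_changed_calc_py; decide
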